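-- pv_equiv track=rewrite | github.com/ashishmh/epi-judge | epi_judge_python/string_decompositions_into_dictionary_words.py | isConstructableFast
-- ===== SOURCE A (Python) =====
-- import collections
--
-- def isConstructableFast(str, words):
--     wordMap = collections.defaultdict(int)
--     for word in words:
--         wordMap[word] += 1
--     strMap = collections.defaultdict(int)
--     n = len(words[0])
--     for i in range(0, len(str), n):
--         substr = str[i:i+n]
--         strMap[substr] += 1
--     return wordMap == strMap
-- ===== SOURCE B (Python) =====
-- def isConstructableFast(str, words):
--     n = len(words[0])
--     chunks = [str[i:i+n] for i in range(0, len(str), n)]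
--     return sorted(chunks) == sorted(words)
-- ===== Notes on version B (the rewrite author's own statement) =====
-- stated objective: simpler
-- what changed: Replaces the two hand-built defaultdict frequency maps and their dict comparison by slicing the string into fixed-length chunks and comparing sorted(chunks) with sorted(words).
import Mathlib
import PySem

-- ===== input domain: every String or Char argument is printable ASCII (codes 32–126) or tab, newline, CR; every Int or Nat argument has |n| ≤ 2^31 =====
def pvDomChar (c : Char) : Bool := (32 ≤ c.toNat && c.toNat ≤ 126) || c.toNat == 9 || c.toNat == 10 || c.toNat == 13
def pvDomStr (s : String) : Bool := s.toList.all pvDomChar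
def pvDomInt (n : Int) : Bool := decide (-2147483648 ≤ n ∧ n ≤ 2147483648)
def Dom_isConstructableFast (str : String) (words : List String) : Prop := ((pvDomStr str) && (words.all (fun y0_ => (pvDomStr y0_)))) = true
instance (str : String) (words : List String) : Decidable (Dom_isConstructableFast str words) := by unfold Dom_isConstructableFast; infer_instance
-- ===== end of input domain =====

-- B replaces A's two defaultdict frequency maps and dict comparison by sorting the
-- fixed-length chunks and the word list and comparing them (simpler, same multiset test).


-- ===== PORT A =====
-- Python's `dict ==` ignores insertion order: equal lookups both ways.
def pyDictEq (d d' : PySem.Dict String Int) : Bool :=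
  d.keys.all (fun k => d.get? k == d'.get? k) && d'.keys.all (fun k => d.get? k == d'.get? k)

def isConstructableFast (str : String) (words : List String) : Bool :=
  let wordMap := words.foldl (fun d w => d.modify w 0 (· + 1)) (PySem.Dict.empty : PySem.Dict String Int)
  match PySem.List.pyGet? words 0 with
  | none => false  -- IndexError on words[0] (outside Pre_)
  | some w0 =>
    let n := PySem.Str.len w0
    if n == 0 then false  -- ValueError: range() step 0 (outside Pre_)
    else
      let strMap := (PySem.List.pyRange 0 (PySem.Str.len str) n).foldl
        (fun d i => d.modify (PySem.Str.slice str (some i) (some (i + n))) 0 (· + 1))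
        (PySem.Dict.empty : PySem.Dict String Int)
      pyDictEq wordMap strMap

-- ===== PORT B =====
def isConstructableFast_alt (str : String) (words : List String) : Bool :=
  match PySem.List.pyGet? words 0 with
  | none => false  -- IndexError on words[0] (outside Pre_)
  | some w0 =>
    let n := PySem.Str.len w0
    if n == 0 then false  -- ValueError: range() step 0 (outside Pre_)
    else
      let chunks := (PySem.List.pyRange 0 (PySem.Str.len str) n).map
        (fun i => PySem.Str.slice str (some i) (some (i + n)))
      PySem.List.sorted chunks (fun x => x) == PySem.List.sorted words (fun x => x)

-- ===== PRECONDITION & SPEC =====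
-- Pre_ excludes exactly the inputs where both Pythons raise: empty `words`
-- (IndexError on words[0]) and an empty first word (ValueError: range() step 0).
def Pre_isConstructableFast (str : String) (words : List String) : Prop :=
  words ≠ [] ∧ (words.headD "").toList ≠ []
instance (str : String) (words : List String) : Decidable (Pre_isConstructableFast str words) := by
  unfold Pre_isConstructableFast; infer_instance

def pvWitness_isConstructableFast : String × List String := ("abab", ["ab", "ab"])

def Spec_isConstructableFast (str : String) (words : List String) (out : Bool) : Prop := out = isConstructableFast_alt str words
instance (str : String) (words : List String) (out : Bool) : Decidable (Spec_isConstructableFast str words out) := by unfold Spec_isConstructableFast; infer_instance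

-- ===== CLAIM (what is proved, stated in full; the proofs are below) =====
def Claim_equal_isConstructableFast : Prop := ∀ (str : String) (words : List String), Dom_isConstructableFast str words → Pre_isConstructableFast str words → Spec_isConstructableFast str words (isConstructableFast str words)

-- ===== LEMMAS AND PROOFS =====

theorem get?_counter (xs : List String) (k : String) :
    (PySem.Dict.counter xs).get? k = if k ∈ xs then some ((xs.count k : Nat) : Int) else none := by
  have hc := PySem.Dict.contains_counter xs k
  rw [PySem.Dict.contains_eq_isSome_get?] at hc
  have hd := PySem.Dict.getD_counter xs k
  rw [PySem.Dict.getD_eq_get?_getD] at hd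
  by_cases h : k ∈ xs
  · simp only [h, if_true]
    cases hg : (PySem.Dict.counter xs).get? k with
    | none => rw [hg] at hc; simp [h] at hc
    | some v => rw [hg] at hd; simp at hd; simp [hd, List.count]
  · simp only [h, if_false]
    cases hg : (PySem.Dict.counter xs).get? k with
    | none => rfl
    | some v => rw [hg] at hc; simp [h] at hc

theorem pyDictEq_counter_iff (xs ys : List String) :
    pyDictEq (PySem.Dict.counter xs) (PySem.Dict.counter ys) = true ↔ xs.Perm ys := by
  unfold pyDictEq
  simp only [Bool.and_eq_true, List.all_eq_true, PySem.Dict.keys_counter,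
    PySem.Set.mem_ofList, get?_counter, beq_iff_eq]
  constructor
  · rintro ⟨h1, h2⟩
    rw [List.perm_iff_count]
    intro a
    by_cases hx : a ∈ xs
    · have := h1 a hx
      by_cases hy : a ∈ ys
      · simpa [hx, hy] using this
      · simp [hx, hy] at this
    · by_cases hy : a ∈ ys
      · have := h2 a hy
        simp [hx, hy] at this
      · simp [List.count_eq_zero_of_not_mem hx, List.count_eq_zero_of_not_mem hy]
  · intro hp
    have hcnt := List.perm_iff_count.mp hp
    constructor
    · intro k hk
      have hky : k ∈ ys := (hp.mem_iff).mp hk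
      simp [hk, hky, hcnt k]
    · intro k hk
      have hkx : k ∈ xs := (hp.mem_iff).mpr hk
      simp [hk, hkx, hcnt k]

-- ===== VERDICT (by name: the statement is the Claim_ definition above) =====
theorem isConstructableFast_spec : Claim_equal_isConstructableFast := by
  intro str words _ hpre
  unfold Spec_isConstructableFast isConstructableFast isConstructableFast_alt
  obtain ⟨hne, hh⟩ := hpre
  obtain ⟨w, ws, rfl⟩ := List.exists_cons_of_ne_nil hne
  have hget : PySem.List.pyGet? (w :: ws) (0 : Int) = some w := by
    simp [PySem.List.pyGet?, PySem.List.pyIdx?]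
  rw [hget]
  simp only [List.headD] at hh
  have hn : (PySem.Str.len w == 0) = false := by
    rw [PySem.Str.len_eq]
    simpa using hh
  simp only [hn, Bool.false_eq_true, if_false]
  -- both counters
  rw [show (List.foldl (fun d i => d.modify (PySem.Str.slice str (some i) (some (i + PySem.Str.len w))) 0 (· + 1))
        (PySem.Dict.empty : PySem.Dict String Int)
        (PySem.List.pyRange 0 (PySem.Str.len str) (PySem.Str.len w)))
      = PySem.Dict.counter ((PySem.List.pyRange 0 (PySem.Str.len str) (PySem.Str.len w)).map
          (fun i => PySem.Str.slice str (some i) (some (i + PySem.Str.len w)))) from by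
    rw [PySem.Dict.counter_eq_foldl, List.foldl_map]]
  rw [show (List.foldl (fun d v => d.modify v 0 (· + 1)) (PySem.Dict.empty : PySem.Dict String Int) (w :: ws))
      = PySem.Dict.counter (w :: ws) from by rw [PySem.Dict.counter_eq_foldl]]
  rw [Bool.eq_iff_iff]
  rw [pyDictEq_counter_iff, beq_iff_eq, PySem.List.sorted_id_eq_sorted_id_iff_perm]
  exact ⟨List.Perm.symm, List.Perm.symm⟩
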